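-- pv_equiv track=rewrite | github.com/ionutdd/Formal-Methods-in-Software-Engineering- | main.py | generate_divisors
-- ===== SOURCE A (Python) =====
-- from itertools import product
--
-- def generate_divisors(prime_factors):
--     """Generates all divisors from a dictionary of prime factors and exponents."""
--     primes = list(prime_factors.keys())
--     exponents = [range(exp + 1) for exp in prime_factors.values()]
--     divisors = []
--     for exp_comb in product(*exponents):
--         divisor = 1
--         for prime, exp in zip(primes, exp_comb):
--             divisor *= prime ** exp
--         divisors.append(divisor)
--     return sorted(divisors)
-- ===== SOURCE B (Python) =====
-- def generate_divisors(prime_factors):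
--     """Generates all divisors from a dictionary of prime factors and exponents."""
--     divisors = [1]
--     for prime, exp in prime_factors.items():
--         divisors = [d * prime ** e for d in divisors for e in range(exp + 1)]
--     return sorted(divisors)
-- ===== Notes on version B (the rewrite author's own statement) =====
-- stated objective: simpler
-- what changed: B builds the divisor list incrementally, folding over the prime/exponent pairs and multiplying each current divisor by every power of the new prime, instead of materialising the full Cartesian product of exponent tuples and recomputing each divisor from scratch with an inner zip loop.
import Mathlib
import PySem

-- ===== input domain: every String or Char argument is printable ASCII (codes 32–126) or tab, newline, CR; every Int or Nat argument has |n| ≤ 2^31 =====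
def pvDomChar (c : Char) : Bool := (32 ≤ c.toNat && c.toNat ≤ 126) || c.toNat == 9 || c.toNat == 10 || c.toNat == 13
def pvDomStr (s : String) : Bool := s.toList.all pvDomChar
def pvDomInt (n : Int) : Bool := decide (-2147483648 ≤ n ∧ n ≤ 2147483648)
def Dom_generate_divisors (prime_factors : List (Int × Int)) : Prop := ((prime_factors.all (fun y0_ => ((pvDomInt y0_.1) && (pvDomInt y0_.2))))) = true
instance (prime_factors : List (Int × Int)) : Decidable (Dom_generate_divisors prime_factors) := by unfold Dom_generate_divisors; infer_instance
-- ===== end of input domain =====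

-- B folds over the prime/exponent pairs, extending a running divisor list with every
-- power of each prime, instead of A's Cartesian product of exponent tuples; simpler.


-- ===== PORT A =====
-- itertools.product(*lists): leftmost iterable varies slowest
def pvProduct : List (List Int) → List (List Int)
  | [] => [[]]
  | xs :: rest => xs.flatMap (fun x => (pvProduct rest).map (fun t => x :: t))

-- exponents drawn from range(exp+1) are ≥ 0, so 'prime ** exp' is the Nat power e.toNat
def generate_divisors (prime_factors : List (Int × Int)) : List Int :=
  let primes := prime_factors.map Prod.fst
  let exponents := prime_factors.map (fun kv => PySem.List.pyRange 0 (kv.2 + 1) 1)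
  let divisors := (pvProduct exponents).foldl (fun divs exp_comb =>
    divs ++ [(primes.zip exp_comb).foldl (fun divisor pe => divisor * pe.1 ^ pe.2.toNat) 1]) []
  PySem.List.sorted divisors id false

-- ===== PORT B =====
def generate_divisors_alt (prime_factors : List (Int × Int)) : List Int :=
  let divisors := prime_factors.foldl (fun divs kv =>
    divs.flatMap (fun d => (PySem.List.pyRange 0 (kv.2 + 1) 1).map (fun e => d * kv.1 ^ e.toNat))) [1]
  PySem.List.sorted divisors id false

-- ===== PRECONDITION & SPEC =====
def Spec_generate_divisors (prime_factors : List (Int × Int)) (out : List Int) : Prop := out = generate_divisors_alt prime_factors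
instance (prime_factors : List (Int × Int)) (out : List Int) : Decidable (Spec_generate_divisors prime_factors out) := by unfold Spec_generate_divisors; infer_instance

-- ===== CLAIM (what is proved, stated in full; the proofs are below) =====
def Claim_equal_generate_divisors : Prop := ∀ (prime_factors : List (Int × Int)), Dom_generate_divisors prime_factors → Spec_generate_divisors prime_factors (generate_divisors prime_factors)

-- ===== LEMMAS AND PROOFS =====

-- B's one step of the fold
def pvStep (divs : List Int) (kv : Int × Int) : List Int :=
  divs.flatMap (fun d => (PySem.List.pyRange 0 (kv.2 + 1) 1).map (fun e => d * kv.1 ^ e.toNat))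

-- A's inner loop, seeded at d, expressed over the pair list and the combination
def pvZipProd (d : Int) (pf : List (Int × Int)) (comb : List Int) : Int :=
  ((pf.map Prod.fst).zip comb).foldl (fun divisor pe => divisor * pe.1 ^ pe.2.toNat) d

theorem pvZipProd_cons (d : Int) (kv : Int × Int) (rest : List (Int × Int)) (e : Int) (comb : List Int) :
    pvZipProd d (kv :: rest) (e :: comb) = pvZipProd (d * kv.1 ^ e.toNat) rest comb := by
  simp [pvZipProd]

theorem pv_foldl_seed (pf : List (Int × Int)) (acc : List Int) :
    pf.foldl pvStep acc = acc.flatMap (fun d => pf.foldl pvStep [d]) := by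
  induction pf generalizing acc with
  | nil => simp
  | cons kv rest ih =>
    have hstep : ∀ a : List Int, pvStep a kv = a.flatMap (fun d => pvStep [d] kv) := by
      intro a; simp [pvStep]
    calc (kv :: rest).foldl pvStep acc
        = rest.foldl pvStep (pvStep acc kv) := rfl
      _ = (pvStep acc kv).flatMap (fun d => rest.foldl pvStep [d]) := ih _
      _ = acc.flatMap (fun d => (pvStep [d] kv).flatMap (fun d' => rest.foldl pvStep [d'] )) := by
          rw [hstep]; simp [List.flatMap_assoc]
      _ = acc.flatMap (fun d => (kv :: rest).foldl pvStep [d]) := by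
          apply List.flatMap_congr; intro d _
          show (pvStep [d] kv).flatMap (fun d' => rest.foldl pvStep [d']) = rest.foldl pvStep (pvStep [d] kv)
          exact (ih _).symm

theorem pv_fold_eq_prod (pf : List (Int × Int)) (d : Int) :
    pf.foldl pvStep [d]
      = (pvProduct (pf.map (fun kv => PySem.List.pyRange 0 (kv.2 + 1) 1))).map (pvZipProd d pf) := by
  induction pf generalizing d with
  | nil => simp [pvProduct, pvZipProd]
  | cons kv rest ih =>
    have h1 : (kv :: rest).foldl pvStep [d] = (pvStep [d] kv).flatMap (fun d' => rest.foldl pvStep [d']) := by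
      show rest.foldl pvStep (pvStep [d] kv) = _
      exact pv_foldl_seed rest _
    rw [h1]
    simp only [pvStep, List.flatMap_cons, List.flatMap_nil, List.append_nil, List.flatMap_map]
    simp only [List.map_cons, pvProduct, List.map_flatMap]
    apply List.flatMap_congr; intro e _
    rw [ih, List.map_map]
    apply List.map_congr_left; intro t _
    exact (pvZipProd_cons d kv rest e t).symm

-- A's outer accumulation is a map
theorem pv_foldl_push {α β : Type} (f : α → β) (l : List α) (acc : List β) :
    l.foldl (fun divs c => divs ++ [f c]) acc = acc ++ l.map f := by
  induction l generalizing acc with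
  | nil => simp
  | cons x xs ih => simp [ih, List.append_assoc]

-- ===== VERDICT (by name: the statement is the Claim_ definition above) =====
theorem generate_divisors_spec : Claim_equal_generate_divisors := by
  intro pf _
  show generate_divisors pf = generate_divisors_alt pf
  unfold generate_divisors generate_divisors_alt
  simp only []
  show PySem.List.sorted _ id false = PySem.List.sorted (pf.foldl pvStep [1]) id false
  rw [pv_foldl_push, List.nil_append, pv_fold_eq_prod]
  rfl
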